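-- pv_equiv track=rewrite | github.com/rraman9/learn | python/functions.py | capitalizealternateletters
-- ===== SOURCE A (Python) =====
-- def capitalizealternateletters(str):
--     count = 0
--     returnstr = ""
--     for letter in str:
--         if count%2 == 0:
--             returnstr = returnstr + letter.upper()
--         else:
--             returnstr = returnstr + letter.lower()
--         count = count+1
--     return returnstr
-- ===== SOURCE B (Python) =====
-- def capitalizealternateletters(str):
--     out = []
--     i = 0
--     n = len(str)
--     while i + 1 < n:
--         out.append(str[i].upper())
--         out.append(str[i + 1].lower())
--         i += 2
--     if i < n:
--         out.append(str[i].upper())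
--     return "".join(out)
-- ===== Notes on version B (the rewrite author's own statement) =====
-- stated objective: alternative
-- what changed: Replaced the parity-counter fold with string concatenation by a pairwise loop that consumes two characters per step (upper, lower) with no counter or modulo test, collecting into a list joined once at the end.
import Mathlib
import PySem

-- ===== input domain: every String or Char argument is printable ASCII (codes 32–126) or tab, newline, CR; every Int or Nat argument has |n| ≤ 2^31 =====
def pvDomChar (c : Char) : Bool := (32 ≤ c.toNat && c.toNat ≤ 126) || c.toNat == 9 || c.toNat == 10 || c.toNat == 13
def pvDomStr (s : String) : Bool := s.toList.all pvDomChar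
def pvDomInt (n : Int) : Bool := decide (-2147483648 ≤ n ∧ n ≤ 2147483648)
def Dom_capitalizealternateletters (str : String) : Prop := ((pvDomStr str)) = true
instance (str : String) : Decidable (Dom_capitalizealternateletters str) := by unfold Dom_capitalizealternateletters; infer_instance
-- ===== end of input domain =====

-- B replaces A's parity-counter fold (quadratic string concatenation) with a pairwise
-- two-chars-per-step loop collected into a list and joined once; return values identical.

-- ===== PORT A =====
-- step of A's for-loop: state (count, returnstr); branch on count % 2, append, count += 1
def capAStep (st : Int × List Char) (letter : Char) : Int × List Char :=
  if PySem.Int.mod st.1 2 == 0 then (st.1 + 1, st.2 ++ [PySem.Chars.upperChar letter])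
  else (st.1 + 1, st.2 ++ [PySem.Chars.lowerChar letter])

def capitalizealternateletters (str : String) : String :=
  String.ofList (str.toList.foldl capAStep (0, [])).2

-- ===== PORT B =====
-- Source B's while-loop: two characters per iteration (advance i by 2 = drop two), then
-- the trailing single character if the length is odd; transcribed as two-at-a-time recursion.
def capBGo : List Char → List Char
  | c :: d :: rest => PySem.Chars.upperChar c :: PySem.Chars.lowerChar d :: capBGo rest
  | [c] => [PySem.Chars.upperChar c]
  | [] => []

def capitalizealternateletters_alt (str : String) : String :=
  String.ofList (capBGo str.toList)

-- ===== PRECONDITION & SPEC =====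
def Spec_capitalizealternateletters (str : String) (out : String) : Prop := out = capitalizealternateletters_alt str
instance (str : String) (out : String) : Decidable (Spec_capitalizealternateletters str out) := by unfold Spec_capitalizealternateletters; infer_instance

-- ===== CLAIM (what is proved, stated in full; the proofs are below) =====
def Claim_equal_capitalizealternateletters : Prop := ∀ (str : String), Dom_capitalizealternateletters str → Spec_capitalizealternateletters str (capitalizealternateletters str)

-- ===== LEMMAS AND PROOFS =====
-- invariant of A's fold: from an even counter, the fold appends exactly B's pairwise output
theorem capAStep_foldl_even (l : List Char) : ∀ (k : Int) (acc : List Char),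
    PySem.Int.mod k 2 = 0 → (l.foldl capAStep (k, acc)).2 = acc ++ capBGo l := by
  induction l using capBGo.induct with
  | case1 c d rest ih =>
    intro k acc hk
    have hk' : k % 2 = 0 := by rwa [PySem.Int.mod_eq_emod_of_pos (by omega)] at hk
    have hm : PySem.Int.mod (k + 1) 2 = 1 := by
      rw [PySem.Int.mod_eq_emod_of_pos (by omega)]; omega
    have h2 : PySem.Int.mod (k + 1 + 1) 2 = 0 := by
      rw [PySem.Int.mod_eq_emod_of_pos (by omega)]; omega
    have e1 : capAStep (k, acc) c = (k + 1, acc ++ [PySem.Chars.upperChar c]) := by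
      unfold capAStep; rw [hk]; simp
    have e2 : capAStep (k + 1, acc ++ [PySem.Chars.upperChar c]) d
        = (k + 1 + 1, (acc ++ [PySem.Chars.upperChar c]) ++ [PySem.Chars.lowerChar d]) := by
      unfold capAStep; rw [hm]; simp
    rw [List.foldl_cons, List.foldl_cons, e1, e2, ih (k + 1 + 1) _ h2]
    simp [capBGo]
  | case2 c =>
    intro k acc hk
    have e1 : capAStep (k, acc) c = (k + 1, acc ++ [PySem.Chars.upperChar c]) := by
      unfold capAStep; rw [hk]; simp
    rw [List.foldl_cons, List.foldl_nil, e1]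
    simp [capBGo]
  | case3 =>
    intro k acc _
    simp [capBGo]

-- ===== VERDICT (by name: the statement is the Claim_ definition above) =====
theorem capitalizealternateletters_spec : Claim_equal_capitalizealternateletters := by
  intro str _
  unfold Spec_capitalizealternateletters capitalizealternateletters capitalizealternateletters_alt
  rw [capAStep_foldl_even str.toList 0 [] (by decide)]
  simp
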